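-- pv_equiv track=rewrite | github.com/Jeba-cs/SMART_TRADING_MULTIAGENT_ADK_APP | technical_analyst_agent.py | _identify_market_regime
-- ===== SOURCE A (Python) =====
-- from typing import Dict, Any, List, Optional, Tuple
--
-- def _identify_market_regime(sector_rankings: List[Dict]) -> str:
--     """Identify market regime based on sector leadership"""
--     try:
--         if not sector_rankings:
--             return "unknown"
--
--         top_sectors = [s['sector'] for s in sector_rankings[:3]]
--
--         # Growth regime indicators
--         growth_sectors = ['Technology', 'Communication Services', 'Consumer Discretionary']
--         growth_leadership = any(sector in growth_sectors for sector in top_sectors)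
--
--         # Value regime indicators
--         value_sectors = ['Financials', 'Energy', 'Materials']
--         value_leadership = any(sector in value_sectors for sector in top_sectors)
--
--         # Defensive regime indicators
--         defensive_sectors = ['Utilities', 'Consumer Staples', 'Healthcare']
--         defensive_leadership = any(sector in defensive_sectors for sector in top_sectors)
--
--         if growth_leadership:
--             return "growth_regime"
--         elif value_leadership:
--             return "value_regime"
--         elif defensive_leadership:
--             return "defensive_regime"
--         else:
--             return "mixed_regime"
--
--     except Exception as e:
--         return "unknown"
-- ===== SOURCE B (Python) =====
-- from typing import Dict, List
--
-- # sector -> priority rank (0 = growth, 1 = value, 2 = defensive); 3 = no regime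
-- _PRIORITY = {
--     'Technology': 0, 'Communication Services': 0, 'Consumer Discretionary': 0,
--     'Financials': 1, 'Energy': 1, 'Materials': 1,
--     'Utilities': 2, 'Consumer Staples': 2, 'Healthcare': 2,
-- }
-- _NAMES = ["growth_regime", "value_regime", "defensive_regime", "mixed_regime"]
--
-- def _identify_market_regime(sector_rankings: List[Dict]) -> str:
--     """Identify market regime: best (minimum) priority rank among the top-3 sectors."""
--     try:
--         if not sector_rankings:
--             return "unknown"
--         best = 3
--         for s in sector_rankings[:3]:
--             best = min(best, _PRIORITY.get(s['sector'], 3))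
--         return _NAMES[best]
--     except Exception:
--         return "unknown"
-- ===== Notes on version B (the rewrite author's own statement) =====
-- stated objective: alternative
-- what changed: Replaces the three per-regime any-membership booleans and the if/elif chain with a single pass that folds a minimum priority rank per top sector (via a sector-to-rank dict) and indexes a name table with the result.
import Mathlib
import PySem

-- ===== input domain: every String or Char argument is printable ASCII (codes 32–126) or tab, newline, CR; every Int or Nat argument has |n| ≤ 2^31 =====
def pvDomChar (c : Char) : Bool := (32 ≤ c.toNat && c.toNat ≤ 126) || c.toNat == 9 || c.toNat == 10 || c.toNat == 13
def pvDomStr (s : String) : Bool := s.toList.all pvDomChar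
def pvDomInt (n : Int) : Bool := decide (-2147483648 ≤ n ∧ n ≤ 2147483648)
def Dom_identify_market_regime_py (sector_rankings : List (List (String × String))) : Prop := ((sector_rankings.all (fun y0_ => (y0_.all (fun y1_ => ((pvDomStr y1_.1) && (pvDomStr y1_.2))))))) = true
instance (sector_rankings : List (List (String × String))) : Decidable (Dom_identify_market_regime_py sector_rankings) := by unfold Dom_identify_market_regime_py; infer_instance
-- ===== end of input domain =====

-- B replaces A's per-regime booleans and if/elif chain with a one-pass minimum of per-sector priority ranks indexed into a name table; objective: alternative.


-- ===== PORT A =====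
def identify_market_regime_py (sector_rankings : List (List (String × String))) : String :=
  -- 'if not sector_rankings: return "unknown"'
  if sector_rankings.isEmpty then "unknown" else
  -- 'top_sectors = [s['sector'] for s in sector_rankings[:3]]'; a missing 'sector' key raises
  -- KeyError, caught by the try/except -> "unknown"  (Dict.get? = none there)
  match (sector_rankings.take 3).mapM (fun d => (PySem.Dict.mk d).get? "sector") with
  | none => "unknown"
  | some top_sectors =>
    let growth_sectors := ["Technology", "Communication Services", "Consumer Discretionary"]
    let growth_leadership := top_sectors.any (fun sector => growth_sectors.contains sector)
    let value_sectors := ["Financials", "Energy", "Materials"]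
    let value_leadership := top_sectors.any (fun sector => value_sectors.contains sector)
    let defensive_sectors := ["Utilities", "Consumer Staples", "Healthcare"]
    let defensive_leadership := top_sectors.any (fun sector => defensive_sectors.contains sector)
    if growth_leadership then "growth_regime"
    else if value_leadership then "value_regime"
    else if defensive_leadership then "defensive_regime"
    else "mixed_regime"

-- ===== PORT B =====
-- B: sector -> priority rank dictionary (0 growth, 1 value, 2 defensive; 3 = none),
-- one fold taking the minimum rank over the top-3 sectors, then a name-table lookup.
def pvPriority : PySem.Dict String Nat :=
  PySem.Dict.mk
    [("Technology", 0), ("Communication Services", 0), ("Consumer Discretionary", 0),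
     ("Financials", 1), ("Energy", 1), ("Materials", 1),
     ("Utilities", 2), ("Consumer Staples", 2), ("Healthcare", 2)]

def pvNames : List String := ["growth_regime", "value_regime", "defensive_regime", "mixed_regime"]

def identify_market_regime_py_alt (sector_rankings : List (List (String × String))) : String :=
  if sector_rankings.isEmpty then "unknown" else
  -- the loop reads s['sector'] per row; a missing key raises KeyError, caught -> "unknown"
  match (sector_rankings.take 3).mapM (fun d => (PySem.Dict.mk d).get? "sector") with
  | none => "unknown"
  | some tops =>
    let best := tops.foldl (fun b sector => min b (pvPriority.getD sector 3)) 3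
    -- '_NAMES[best]' (an IndexError would be caught -> "unknown"; best ≤ 3 so it never fires)
    (PySem.List.pyGet? pvNames (Int.ofNat best)).getD "unknown"

-- ===== PRECONDITION & SPEC =====
def Spec_identify_market_regime_py (sector_rankings : List (List (String × String))) (out : String) : Prop := out = identify_market_regime_py_alt sector_rankings
instance (sector_rankings : List (List (String × String))) (out : String) : Decidable (Spec_identify_market_regime_py sector_rankings out) := by unfold Spec_identify_market_regime_py; infer_instance

-- ===== CLAIM (what is proved, stated in full; the proofs are below) =====
def Claim_equal_identify_market_regime_py : Prop := ∀ (sector_rankings : List (List (String × String))), Dom_identify_market_regime_py sector_rankings → Spec_identify_market_regime_py sector_rankings (identify_market_regime_py sector_rankings)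

-- ===== LEMMAS AND PROOFS =====

-- priority rank of a single sector, as the if-chain A's membership tests induce
theorem pvPriority_getD (s : String) :
    pvPriority.getD s 3 =
      (if (["Technology", "Communication Services", "Consumer Discretionary"] : List String).contains s then 0
       else if (["Financials", "Energy", "Materials"] : List String).contains s then 1
       else if (["Utilities", "Consumer Staples", "Healthcare"] : List String).contains s then 2
       else 3) := by
  simp only [pvPriority, PySem.Dict.getD, PySem.Dict.get?,
    List.contains_eq_mem]
  by_cases h1 : s = "Technology" <;> by_cases h2 : s = "Communication Services" <;>
    by_cases h3 : s = "Consumer Discretionary" <;> by_cases h4 : s = "Financials" <;>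
    by_cases h5 : s = "Energy" <;> by_cases h6 : s = "Materials" <;>
    by_cases h7 : s = "Utilities" <;> by_cases h8 : s = "Consumer Staples" <;>
    by_cases h9 : s = "Healthcare" <;> simp_all [beq_iff_eq, eq_comm (b := s)]

-- the fold computing the minimum rank, characterised by A's three 'any' tests
theorem fold_min_char (l : List String) (b : Nat) (hb : b ≤ 3) :
    l.foldl (fun b sector => min b (pvPriority.getD sector 3)) b =
      min b
        (if l.any (fun sector => (["Technology", "Communication Services", "Consumer Discretionary"] : List String).contains sector) then 0
         else if l.any (fun sector => (["Financials", "Energy", "Materials"] : List String).contains sector) then 1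
         else if l.any (fun sector => (["Utilities", "Consumer Staples", "Healthcare"] : List String).contains sector) then 2
         else 3) := by
  induction l generalizing b with
  | nil => simp; omega
  | cons s l ih =>
    simp only [List.foldl_cons, List.any_cons, Bool.or_eq_true]
    rw [ih (min b (pvPriority.getD s 3)) (by omega), pvPriority_getD s]
    split_ifs with g1 g2 g3 g4 g5 g6 g7 g8 g9 g10 g11 g12 g13 g14 g15 g16 g17 g18 g19 <;>
      first | omega | tauto

-- ===== VERDICT (by name: the statement is the Claim_ definition above) =====
theorem identify_market_regime_py_spec : Claim_equal_identify_market_regime_py := by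
  intro sector_rankings _
  unfold Spec_identify_market_regime_py identify_market_regime_py identify_market_regime_py_alt
  cases sector_rankings with
  | nil => rfl
  | cons d rest =>
    cases hm : ((d :: rest).take 3).mapM (fun d => (PySem.Dict.mk d).get? "sector") with
    | none => rfl
    | some top =>
      show (if (top.any fun sector => (["Technology", "Communication Services", "Consumer Discretionary"] : List String).contains sector) = true then "growth_regime"
            else if (top.any fun sector => (["Financials", "Energy", "Materials"] : List String).contains sector) = true then "value_regime"
            else if (top.any fun sector => (["Utilities", "Consumer Staples", "Healthcare"] : List String).contains sector) = true then "defensive_regime"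
            else "mixed_regime")
          = (PySem.List.pyGet? pvNames (Int.ofNat (top.foldl (fun b sector => min b (pvPriority.getD sector 3)) 3))).getD "unknown"
      rw [fold_min_char top 3 (by omega)]
      split_ifs <;> rfl
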